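-- pv_equiv track=rewrite | github.com/mingmingli916/algorithms | python/collections_/008 Piling Up.py | piling_up
-- ===== SOURCE A (Python) =====
-- def piling_up(lst):
--     q = []
--     while lst:
--         if lst[0] == lst[-1]:
--             value = lst.pop(0)
--         elif lst[0] > lst[-1]:
--             value = lst.pop(0)
--         else:
--             value = lst.pop()
--
--         if q:
--             if value > q[-1]:
--                 return 'No'
--         q.append(value)
--     return 'Yes'
-- ===== SOURCE B (Python) =====
-- def piling_up(lst):
--     i, j = 0, len(lst) - 1
--     prev = None
--     while i <= j:
--         if lst[i] >= lst[j]: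
--             value = lst[i]
--             i += 1
--         else:
--             value = lst[j]
--             j -= 1
--         if prev is not None and value > prev:
--             return 'No'
--         prev = value
--     return 'Yes'
-- ===== Notes on version B (the rewrite author's own statement) =====
-- stated objective: faster
-- what changed: Two index pointers walk inward over the unmodified list tracking only the previously taken value, instead of repeatedly popping from lst (pop(0) is O(n)) and appending to a pile list q.
import Mathlib
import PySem

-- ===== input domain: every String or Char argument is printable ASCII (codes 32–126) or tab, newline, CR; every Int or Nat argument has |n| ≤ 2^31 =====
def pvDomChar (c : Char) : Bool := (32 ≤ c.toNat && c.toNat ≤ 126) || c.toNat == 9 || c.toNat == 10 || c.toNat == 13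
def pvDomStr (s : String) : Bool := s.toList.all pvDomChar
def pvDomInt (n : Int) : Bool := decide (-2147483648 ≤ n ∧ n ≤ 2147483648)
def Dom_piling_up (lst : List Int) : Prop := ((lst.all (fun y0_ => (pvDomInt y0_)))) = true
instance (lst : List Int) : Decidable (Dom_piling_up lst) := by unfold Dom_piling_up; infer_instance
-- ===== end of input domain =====

-- B replaces A's destructive pop(0)/pop() loop (pop(0) is O(n)) with two inward-moving
-- index pointers and a single remembered previous value; A empties its argument list in
-- place, B leaves it untouched — the equivalence proved here is about the return value.

-- ===== PORT A =====
-- A's loop: pop from front when lst[0] == lst[-1] or lst[0] > lst[-1], else pop from back;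
-- return 'No' when the taken value exceeds the top of the pile q, else append and continue.
def pilingAuxA (lst q : List Int) : String :=
  match lst with
  | [] => "Yes"
  | x :: rest =>
    let lastv := (x :: rest).getLast (List.cons_ne_nil x rest)
    let value := if x = lastv then x else if x > lastv then x else lastv
    let rest' := if x = lastv then rest else if x > lastv then rest else (x :: rest).dropLast
    if q ≠ [] ∧ value > q.getLast! then "No"
    else pilingAuxA rest' (q ++ [value])
termination_by lst.length
decreasing_by
  split
  · simp
  · split
    · simp
    · simp [List.length_dropLast]

def piling_up (lst : List Int) : String := pilingAuxA lst []

-- ===== PORT B =====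
-- B's loop: indices i, j move inward over the fixed list; prev is the last taken value.
def pilingAuxB (lst : List Int) (i j : Int) (prev : Option Int) : String :=
  if _hij : i ≤ j then
    match PySem.List.pyGet? lst i, PySem.List.pyGet? lst j with
    | some a, some b =>
      let step := if a ≥ b then (a, i + 1, j) else (b, i, j - 1)
      let bad : Bool := match prev with | some p => decide (step.1 > p) | none => false
      if bad then "No"
      else pilingAuxB lst step.2.1 step.2.2 (some step.1)
    | _, _ => "Yes"  -- unreachable: B's indices are always in range
  else "Yes"
termination_by (j + 1 - i).toNat
decreasing_by
  split <;> simp <;> omega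

def piling_up_alt (lst : List Int) : String := pilingAuxB lst 0 (lst.length - 1) none

-- ===== PRECONDITION & SPEC =====
def Spec_piling_up (lst : List Int) (out : String) : Prop := out = piling_up_alt lst
instance (lst : List Int) (out : String) : Decidable (Spec_piling_up lst out) := by unfold Spec_piling_up; infer_instance

-- ===== CLAIM (what is proved, stated in full; the proofs are below) =====
def Claim_equal_piling_up : Prop := ∀ (lst : List Int), Dom_piling_up lst → Spec_piling_up lst (piling_up lst)

-- ===== LEMMAS AND PROOFS =====

-- A's pile q matters only through its last element.
theorem pilingAuxA_congr : ∀ (n : Nat) (l : List Int), l.length = n →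
    ∀ q q' : List Int, q.getLast? = q'.getLast? → pilingAuxA l q = pilingAuxA l q' := by
  intro n
  induction n using Nat.strong_induction_on with
  | _ n IH =>
    intro l hl q q' hq
    match l with
    | [] => simp [pilingAuxA]
    | x :: rest =>
      simp only [pilingAuxA]
      cases hq' : q'.getLast? with
      | none =>
        rw [hq'] at hq
        rw [List.getLast?_eq_none_iff.mp hq, List.getLast?_eq_none_iff.mp hq']
      | some p =>
        rw [hq'] at hq
        have hq1 : q.getLast! = p := List.getLast!_of_getLast? hq
        have hq2 : q'.getLast! = p := List.getLast!_of_getLast? hq'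
        have hqne : q ≠ [] := by intro h; rw [h] at hq; simp at hq
        have hq'ne : q' ≠ [] := by intro h; rw [h] at hq'; simp at hq'
        rw [hq1, hq2]
        simp only [hqne, hq'ne, ne_eq, not_false_eq_true, true_and]
        have hrec : ∀ r : List Int, r.length < n → ∀ v : Int,
            pilingAuxA r (q ++ [v]) = pilingAuxA r (q' ++ [v]) := by
          intro r hr v
          exact IH r.length hr r rfl _ _ (by rw [List.getLast?_concat, List.getLast?_concat])
        have hdl : (x :: rest).dropLast.length < n := by
          simp only [List.length_dropLast, List.length_cons]
          simp only [List.length_cons] at hl; omega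
        have hrl : rest.length < n := by simp only [List.length_cons] at hl; omega
        split
        · split
          · rfl
          · exact hrec _ hrl _
        · split
          · split
            · rfl
            · exact hrec _ hrl _
          · split
            · rfl
            · exact hrec _ hdl _

-- Core: B on indices [i, j] equals A on the corresponding segment, with prev as the pile top.
theorem pilingAuxB_eq_A (lst : List Int) : ∀ (n : Nat) (i j : Int) (prev : Option Int),
    (j + 1 - i).toNat = n → 0 ≤ i → j < lst.length →
    pilingAuxB lst i j prev =
      pilingAuxA ((lst.drop i.toNat).take (j + 1 - i).toNat) prev.toList := by
  intro n
  induction n using Nat.strong_induction_on with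
  | _ n IH =>
    intro i j prev hn hi hj
    by_cases hij : i ≤ j
    · -- nonempty segment
      have hjnn : 0 ≤ j := le_trans hi hij
      have hjlen : j.toNat < lst.length := by omega
      set a := i.toNat with ha
      set m := (j + 1 - i).toNat with hm
      have hajt : a ≤ j.toNat := by omega
      have hnn : m = j.toNat - a + 1 := by omega
      have hga : PySem.List.pyGet? lst i = some lst[a] :=
        PySem.List.pyGet?_eq_some_getElem lst hi (by omega)
      have hgb : PySem.List.pyGet? lst j = some lst[j.toNat] :=
        PySem.List.pyGet?_eq_some_getElem lst hjnn (by omega)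
      have hseglen : ((lst.drop a).take m).length = m := by
        simp [List.length_take, List.length_drop]; omega
      have hsegne : (lst.drop a).take m ≠ [] := by
        intro h; rw [h] at hseglen; simp at hseglen; omega
      obtain ⟨x, rest, hseg⟩ := List.exists_cons_of_ne_nil hsegne
      have hx : x = lst[a] := by
        have h0 : ((lst.drop a).take m)[0]? = some x := by rw [hseg]; rfl
        rw [List.getElem?_take_of_lt (by omega), List.getElem?_drop,
          List.getElem?_eq_getElem (by omega)] at h0
        simpa using (Option.some_injective _ h0).symm
      subst hx
      have hlast : (lst[a] :: rest).getLast (List.cons_ne_nil lst[a] rest) = lst[j.toNat] := by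
        have h0 : (lst[a] :: rest).getLast? = ((lst.drop a).take m)[m - 1]? := by
          rw [← hseg, List.getLast?_eq_getElem?, hseg]
          congr 1
          rw [← hseg, hseglen]
        rw [List.getElem?_take_of_lt (by omega), List.getElem?_drop,
          List.getElem?_eq_getElem (by omega),
          List.getLast?_eq_some_getLast (List.cons_ne_nil lst[a] rest)] at h0
        have h2 := Option.some_injective _ h0
        rw [h2]
        congr 1; omega
      have htail : rest = (lst.drop (a + 1)).take (m - 1) := by
        have h0 : (lst[a] :: rest).tail = rest := rfl
        rw [← h0, ← hseg, ← List.drop_one, List.drop_take, List.drop_drop]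
      have hdropLast : (lst[a] :: rest).dropLast = (lst.drop a).take (m - 1) := by
        rw [← hseg, List.dropLast_eq_take, hseglen, List.take_take]
        congr 1; omega
      have hfront : ∀ prv : List Int, prv.getLast? = (some lst[a]).toList.getLast? →
          pilingAuxB lst (i + 1) j (some lst[a]) = pilingAuxA rest prv := by
        intro prv hprv
        have hIH := IH (m - 1) (by omega) (i + 1) j (some lst[a]) (by omega) (by omega) hj
        have e1 : (i + 1).toNat = a + 1 := by omega
        have e2 : (j + 1 - (i + 1)).toNat = m - 1 := by omega
        rw [e1, e2] at hIH
        rw [hIH, htail]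
        exact pilingAuxA_congr _ _ rfl _ _ hprv.symm
      have hback : ∀ prv : List Int, prv.getLast? = (some lst[j.toNat]).toList.getLast? →
          pilingAuxB lst i (j - 1) (some lst[j.toNat]) = pilingAuxA (lst[a] :: rest).dropLast prv := by
        intro prv hprv
        have hIH := IH (m - 1) (by omega) i (j - 1) (some lst[j.toNat]) (by omega) hi (by omega)
        have e2 : (j - 1 + 1 - i).toNat = m - 1 := by omega
        rw [e2] at hIH
        rw [hIH, hdropLast]
        exact pilingAuxA_congr _ _ rfl _ _ hprv.symm
      rw [pilingAuxB, dif_pos hij, hga, hgb, hseg]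
      conv_rhs => rw [pilingAuxA]
      simp only [hlast]
      by_cases hcmp : lst[a] ≥ lst[j.toNat]
      · -- take the front element
        rw [if_pos hcmp]
        have hc2 : (if lst[a] = lst[j.toNat] then lst[a]
            else if lst[a] > lst[j.toNat] then lst[a] else lst[j.toNat]) = lst[a] := by
          split
          · rfl
          · rw [if_pos (by omega)]
        have hr2 : (if lst[a] = lst[j.toNat] then rest
            else if lst[a] > lst[j.toNat] then rest else (lst[a] :: rest).dropLast) = rest := by
          split
          · rfl
          · rw [if_pos (by omega)]
        simp only [hc2, hr2]
        cases prev with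
        | none =>
          rw [if_neg (by simp)]
          simp only [Option.toList, List.nil_append]
          exact hfront [lst[a]] (by simp)
        | some p =>
          simp only [Option.toList]
          by_cases hgt : lst[a] > p
          · rw [if_pos (by simpa using hgt), if_pos ⟨by simp, by simpa using hgt⟩]
          · rw [if_neg (by simpa using hgt), if_neg (by simp; omega)]
            exact hfront ([p] ++ [lst[a]]) (by simp)
      · -- take the back element
        rw [if_neg hcmp]
        have hlt : lst[a] < lst[j.toNat] := by omega
        have hc2 : (if lst[a] = lst[j.toNat] then lst[a]
            else if lst[a] > lst[j.toNat] then lst[a] else lst[j.toNat]) = lst[j.toNat] := by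
          rw [if_neg (by omega), if_neg (by omega)]
        have hr2 : (if lst[a] = lst[j.toNat] then rest
            else if lst[a] > lst[j.toNat] then rest else (lst[a] :: rest).dropLast) =
            (lst[a] :: rest).dropLast := by
          rw [if_neg (by omega), if_neg (by omega)]
        simp only [hc2, hr2]
        cases prev with
        | none =>
          rw [if_neg (by simp)]
          simp only [Option.toList, List.nil_append]
          exact hback [lst[j.toNat]] (by simp)
        | some p =>
          simp only [Option.toList]
          by_cases hgt : lst[j.toNat] > p
          · rw [if_pos (by simpa using hgt), if_pos ⟨by simp, by simpa using hgt⟩]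
          · rw [if_neg (by simpa using hgt), if_neg (by simp; omega)]
            exact hback ([p] ++ [lst[j.toNat]]) (by simp)
    · -- empty segment: both sides return "Yes"
      have hm0 : (j + 1 - i).toNat = 0 := by omega
      rw [pilingAuxB, dif_neg hij, hm0]
      simp [pilingAuxA]

-- ===== VERDICT (by name: the statement is the Claim_ definition above) =====
theorem piling_up_spec : Claim_equal_piling_up := by
  intro lst _
  unfold Spec_piling_up piling_up piling_up_alt
  rw [pilingAuxB_eq_A lst ((lst.length : Int) - 1 + 1 - 0).toNat 0 ((lst.length : Int) - 1) none rfl le_rfl (by omega)]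
  simp
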